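-- pv_equiv track=rewrite | github.com/Halildeu/autonomous-orchestrator | src/ops/eval_runner_heartbeat_pinpoint.py | _select_read_key
-- ===== SOURCE A (Python) =====
-- from typing import Any, Iterable
--
-- _PREFERRED_KEY_ORDER = ["last_tick_at", "updated_at", "last_status_at", "last_heartbeat_at", "ts"]
--
-- def _select_read_key(keys: Iterable[str]) -> str | None:
--     candidates = {k for k in keys if isinstance(k, str) and k.strip()}
--     if not candidates:
--         return None
--     for candidate in _PREFERRED_KEY_ORDER:
--         if candidate in candidates:
--             return candidate
--     return sorted(candidates)[0]
-- ===== SOURCE B (Python) =====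
-- from typing import Any, Iterable
--
-- _PREFERRED_KEY_ORDER = ["last_tick_at", "updated_at", "last_status_at", "last_heartbeat_at", "ts"]
--
-- def _select_read_key(keys: Iterable[str]) -> str | None:
--     candidates = {k for k in keys if isinstance(k, str) and k.strip()}
--     if not candidates:
--         return None
--     rank = {k: i for i, k in enumerate(_PREFERRED_KEY_ORDER)}
--     n = len(_PREFERRED_KEY_ORDER)
--     return min(candidates, key=lambda k: (rank.get(k, n), k))
-- ===== Notes on version B (the rewrite author's own statement) =====
-- stated objective: alternative
-- what changed: Replaces A's explicit preference loop plus sorted-fallback with a single rank-keyed min pass: each preferred key maps to its index, all others share rank len(order) and are tie-broken by the string itself.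
import Mathlib
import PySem

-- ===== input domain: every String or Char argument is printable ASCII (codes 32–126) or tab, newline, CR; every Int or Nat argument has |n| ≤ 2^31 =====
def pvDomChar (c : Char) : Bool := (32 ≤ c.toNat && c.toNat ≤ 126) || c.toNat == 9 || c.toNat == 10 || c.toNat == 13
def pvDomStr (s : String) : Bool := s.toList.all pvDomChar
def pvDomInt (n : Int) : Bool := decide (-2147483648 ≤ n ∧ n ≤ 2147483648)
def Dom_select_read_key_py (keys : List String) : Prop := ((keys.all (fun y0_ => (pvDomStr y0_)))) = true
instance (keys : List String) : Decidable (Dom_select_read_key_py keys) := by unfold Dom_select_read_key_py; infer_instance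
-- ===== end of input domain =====

-- B replaces A's preference loop plus sorted-fallback with one rank-keyed min pass over the candidate set.

-- ===== PORT A =====
def pvPreferredKeyOrder : List String := ["last_tick_at", "updated_at", "last_status_at", "last_heartbeat_at", "ts"]

def select_read_key_py (keys : List String) : Option String :=
  let candidates : PySem.Set String := PySem.Set.ofList (keys.filter (fun k => PySem.Str.strip k != ""))
  if candidates = [] then none
  else
    -- 'for candidate in _PREFERRED_KEY_ORDER: if candidate in candidates: return candidate' = first match in order
    match pvPreferredKeyOrder.find? (fun c => candidates.contains c) with
    | some c => some c
    | none => PySem.List.pyGet? (PySem.List.sorted candidates (fun x => x) false) 0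

-- ===== PORT B =====
def pvRank : PySem.Dict String Int :=
  (PySem.List.enumerate pvPreferredKeyOrder).foldl (fun d p => d.insert p.2 p.1) PySem.Dict.empty

def select_read_key_py_alt (keys : List String) : Option String :=
  let candidates : PySem.Set String := PySem.Set.ofList (keys.filter (fun k => PySem.Str.strip k != ""))
  if candidates = [] then none
  else
    PySem.List.min2? candidates (fun k => pvRank.getD k ((pvPreferredKeyOrder.length : Nat) : Int)) (fun k => k)

-- ===== PRECONDITION & SPEC =====
def Spec_select_read_key_py (keys : List String) (out : Option String) : Prop := out = select_read_key_py_alt keys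
instance (keys : List String) (out : Option String) : Decidable (Spec_select_read_key_py keys out) := by unfold Spec_select_read_key_py; infer_instance

-- ===== CLAIM (what is proved, stated in full; the proofs are below) =====
def Claim_equal_select_read_key_py : Prop := ∀ (keys : List String), Dom_select_read_key_py keys → Spec_select_read_key_py keys (select_read_key_py keys)

-- ===== LEMMAS AND PROOFS =====

-- the closed rank function: index in the preferred list, 5 otherwise
def pvRnk (y : String) : Int :=
  if y = "last_tick_at" then 0 else if y = "updated_at" then 1 else if y = "last_status_at" then 2
  else if y = "last_heartbeat_at" then 3 else if y = "ts" then 4 else 5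

theorem pvRank_getD (y : String) : pvRank.getD y ((pvPreferredKeyOrder.length : Nat) : Int) = pvRnk y := by
  unfold pvRnk
  by_cases h1 : y = "last_tick_at"
  · subst h1; decide
  · by_cases h2 : y = "updated_at"
    · subst h2; decide
    · by_cases h3 : y = "last_status_at"
      · subst h3; decide
      · by_cases h4 : y = "last_heartbeat_at"
        · subst h4; decide
        · by_cases h5 : y = "ts"
          · subst h5; decide
          · have b1 : ("last_tick_at" == y) = false := by simp [Ne.symm h1]
            have b2 : ("updated_at" == y) = false := by simp [Ne.symm h2]
            have b3 : ("last_status_at" == y) = false := by simp [Ne.symm h3]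
            have b4 : ("last_heartbeat_at" == y) = false := by simp [Ne.symm h4]
            have b5 : ("ts" == y) = false := by simp [Ne.symm h5]
            simp [pvRank, pvPreferredKeyOrder, PySem.List.enumerate, PySem.Dict.getD,
              PySem.Dict.get?, PySem.Dict.insert, PySem.Dict.empty, List.find?,
              b1, b2, b3, b4, b5, h1, h2, h3, h4, h5]

theorem pvRank_fun_eq : (fun k => pvRank.getD k ((pvPreferredKeyOrder.length : Nat) : Int)) = pvRnk :=
  funext pvRank_getD

-- strict lexicographic order on (rank, string)
def pvLex (k1 : String → Int) (a b : String) : Prop := k1 a < k1 b ∨ (k1 a = k1 b ∧ a < b)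

def pvStep (k1 : String → Int) (acc : Option String) (x : String) : Option String :=
  match acc with
  | none => some x
  | some m2 => if (decide (k1 x < k1 m2) || !decide (k1 m2 < k1 x) && decide ((fun k => k) x < (fun k => k) m2)) = true then some x else some m2

theorem pv_min2_unfold (k1 : String → Int) (xs : List String) : PySem.List.min2? xs k1 (fun k => k) = xs.foldl (pvStep k1) none := by
  unfold PySem.List.min2?
  apply List.foldl_ext
  intro b a _
  cases b <;> rfl

theorem pv_min2_aux (k1 : String → Int) (m : String) :
    ∀ (xs : List String) (acc : Option String),
      (∀ y ∈ xs, y = m ∨ pvLex k1 m y) →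
      (m ∈ xs ∨ acc = some m) →
      (∀ a, acc = some a → a = m ∨ pvLex k1 m a) →
      xs.foldl (pvStep k1) acc = some m := by
  intro xs
  induction xs with
  | nil =>
    intro acc _ hmem _
    rcases hmem with h | h
    · simp at h
    · simpa using h
  | cons x rest ih =>
    intro acc hall hmem hacc
    simp only [List.foldl_cons]
    rcases hx : acc with _ | a <;> subst hx
    · -- acc = none
      apply ih
      · intro y hy; exact hall y (by simp [hy])
      · rcases hall x (by simp) with h | h
        · right; simp [pvStep, h]
        · left
          rcases hmem with h' | h'
          · rcases List.mem_cons.mp h' with rfl | h''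
            · exfalso
              rcases h with hlt | ⟨_, hlt⟩
              · omega
              · exact lt_irrefl _ hlt
            · exact h''
          · simp at h'
      · intro b hb
        simp only [pvStep] at hb
        cases hb
        exact hall x (by simp)
    · have ha := hacc a rfl
      rcases ha with rfl | hlta
      · -- acc = some m
        have hcond : (decide (k1 x < k1 a) || !decide (k1 a < k1 x) && decide ((fun k => k) x < (fun k => k) a)) = false := by
          rcases hall x (by simp) with rfl | h
          · simp
          · rcases h with h | ⟨he, hlt⟩
            · have d1 : decide (k1 x < k1 a) = false := decide_eq_false (by omega)
              have d2 : decide (k1 a < k1 x) = true := decide_eq_true h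
              simp [d1, d2]
            · have d1 : decide (k1 x < k1 a) = false := decide_eq_false (by omega)
              have d3 : decide ((x : String) < a) = false := decide_eq_false (not_lt.mpr (le_of_lt hlt))
              simp only [Bool.or_eq_false_iff, Bool.and_eq_false_iff, d1, d3]
              exact ⟨trivial, Or.inr trivial⟩
        simp only [pvStep, hcond]
        apply ih
        · intro y hy; exact hall y (by simp [hy])
        · right; rfl
        · intro b hb; cases hb; exact Or.inl rfl
      · by_cases hxm : x = m
        · subst hxm
          have hcond : (decide (k1 x < k1 a) || !decide (k1 a < k1 x) && decide ((fun k => k) x < (fun k => k) a)) = true := by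
            rcases hlta with h | ⟨he, hlt⟩
            · have d2 : decide (k1 x < k1 a) = true := decide_eq_true h
              simp [d2]
            · have d1 : decide (k1 a < k1 x) = false := decide_eq_false (by omega)
              have d2 : decide ((x : String) < a) = true := decide_eq_true hlt
              simp only [Bool.or_eq_true, Bool.and_eq_true, Bool.not_eq_true', d1, d2]
              exact Or.inr ⟨trivial, trivial⟩
          simp only [pvStep, hcond]
          apply ih
          · intro y hy; exact hall y (by simp [hy])
          · right; simp
          · intro b hb; cases hb; exact Or.inl rfl
        · have hxs : x = m ∨ pvLex k1 m x := hall x (by simp)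
          have hmr : m ∈ rest := by
            rcases hmem with h' | h'
            · rcases List.mem_cons.mp h' with rfl | h''
              · exact absurd rfl hxm
              · exact h''
            · cases h'
              rcases hlta with hlt | ⟨_, hlt⟩
              · omega
              · exact absurd hlt (lt_irrefl _)
          cases hB : (decide (k1 x < k1 a) || !decide (k1 a < k1 x) && decide ((fun k => k) x < (fun k => k) a)) with
          | true =>
            simp only [pvStep, hB]
            apply ih
            · intro y hy; exact hall y (by simp [hy])
            · left; exact hmr
            · intro b hb; cases hb; exact hxs
          | false =>
            simp only [pvStep, hB]
            apply ih
            · intro y hy; exact hall y (by simp [hy])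
            · left; exact hmr
            · intro b hb; cases hb; exact Or.inr hlta

theorem pv_min2_eq (k1 : String → Int) (xs : List String) (m : String)
    (hm : m ∈ xs) (h : ∀ y ∈ xs, y ≠ m → pvLex k1 m y) :
    PySem.List.min2? xs k1 (fun k => k) = some m := by
  rw [pv_min2_unfold]
  apply pv_min2_aux
  · intro y hy
    by_cases hym : y = m
    · exact Or.inl hym
    · exact Or.inr (h y hy hym)
  · exact Or.inl hm
  · intro a ha; cases ha

-- ===== VERDICT (by name: the statement is the Claim_ definition above) =====
theorem select_read_key_py_spec : Claim_equal_select_read_key_py := by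
  intro keys _
  unfold Spec_select_read_key_py select_read_key_py select_read_key_py_alt
  rw [pvRank_fun_eq]
  simp only []
  set cands : PySem.Set String := PySem.Set.ofList (keys.filter (fun k => PySem.Str.strip k != "")) with hc
  by_cases hemp : cands = []
  · simp [hemp]
  · simp only [if_neg hemp]
    cases h1 : cands.contains "last_tick_at" with
    | true =>
      have mi : "last_tick_at" ∈ cands := by simpa using h1
      have hf : pvPreferredKeyOrder.find? (fun c => cands.contains c) = some "last_tick_at" := by
        simp [pvPreferredKeyOrder, List.find?, mi]
      rw [hf]
      refine (pv_min2_eq pvRnk cands "last_tick_at" mi ?_).symm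
      intro y hy hne
      left
      have hp : pvRnk "last_tick_at" = 0 := by decide
      rw [hp]
      unfold pvRnk
      split_ifs <;> simp_all
    | false =>
      cases h2 : cands.contains "updated_at" with
      | true =>
        have n1 : "last_tick_at" ∉ cands := by simpa using h1
        have mi : "updated_at" ∈ cands := by simpa using h2
        have hf : pvPreferredKeyOrder.find? (fun c => cands.contains c) = some "updated_at" := by
          simp [pvPreferredKeyOrder, List.find?, mi, n1]
        rw [hf]
        refine (pv_min2_eq pvRnk cands "updated_at" mi ?_).symm
        intro y hy hne
        left
        have ne1 : y ≠ "last_tick_at" := fun he => n1 (he ▸ hy)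
        have hp : pvRnk "updated_at" = 1 := by decide
        rw [hp]
        unfold pvRnk
        split_ifs <;> simp_all
      | false =>
        cases h3 : cands.contains "last_status_at" with
        | true =>
          have n1 : "last_tick_at" ∉ cands := by simpa using h1
          have n2 : "updated_at" ∉ cands := by simpa using h2
          have mi : "last_status_at" ∈ cands := by simpa using h3
          have hf : pvPreferredKeyOrder.find? (fun c => cands.contains c) = some "last_status_at" := by
            simp [pvPreferredKeyOrder, List.find?, mi, n1, n2]
          rw [hf]
          refine (pv_min2_eq pvRnk cands "last_status_at" mi ?_).symm
          intro y hy hne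
          left
          have ne1 : y ≠ "last_tick_at" := fun he => n1 (he ▸ hy)
          have ne2 : y ≠ "updated_at" := fun he => n2 (he ▸ hy)
          have hp : pvRnk "last_status_at" = 2 := by decide
          rw [hp]
          unfold pvRnk
          split_ifs <;> simp_all
        | false =>
          cases h4 : cands.contains "last_heartbeat_at" with
          | true =>
            have n1 : "last_tick_at" ∉ cands := by simpa using h1
            have n2 : "updated_at" ∉ cands := by simpa using h2
            have n3 : "last_status_at" ∉ cands := by simpa using h3
            have mi : "last_heartbeat_at" ∈ cands := by simpa using h4
            have hf : pvPreferredKeyOrder.find? (fun c => cands.contains c) = some "last_heartbeat_at" := by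
              simp [pvPreferredKeyOrder, List.find?, mi, n1, n2, n3]
            rw [hf]
            refine (pv_min2_eq pvRnk cands "last_heartbeat_at" mi ?_).symm
            intro y hy hne
            left
            have ne1 : y ≠ "last_tick_at" := fun he => n1 (he ▸ hy)
            have ne2 : y ≠ "updated_at" := fun he => n2 (he ▸ hy)
            have ne3 : y ≠ "last_status_at" := fun he => n3 (he ▸ hy)
            have hp : pvRnk "last_heartbeat_at" = 3 := by decide
            rw [hp]
            unfold pvRnk
            split_ifs <;> simp_all
          | false =>
            cases h5 : cands.contains "ts" with
            | true =>
              have n1 : "last_tick_at" ∉ cands := by simpa using h1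
              have n2 : "updated_at" ∉ cands := by simpa using h2
              have n3 : "last_status_at" ∉ cands := by simpa using h3
              have n4 : "last_heartbeat_at" ∉ cands := by simpa using h4
              have mi : "ts" ∈ cands := by simpa using h5
              have hf : pvPreferredKeyOrder.find? (fun c => cands.contains c) = some "ts" := by
                simp [pvPreferredKeyOrder, List.find?, mi, n1, n2, n3, n4]
              rw [hf]
              refine (pv_min2_eq pvRnk cands "ts" mi ?_).symm
              intro y hy hne
              left
              have ne1 : y ≠ "last_tick_at" := fun he => n1 (he ▸ hy)
              have ne2 : y ≠ "updated_at" := fun he => n2 (he ▸ hy)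
              have ne3 : y ≠ "last_status_at" := fun he => n3 (he ▸ hy)
              have ne4 : y ≠ "last_heartbeat_at" := fun he => n4 (he ▸ hy)
              have hp : pvRnk "ts" = 4 := by decide
              rw [hp]
              unfold pvRnk
              split_ifs <;> simp_all
            | false =>
              have n1 : "last_tick_at" ∉ cands := by simpa using h1
              have n2 : "updated_at" ∉ cands := by simpa using h2
              have n3 : "last_status_at" ∉ cands := by simpa using h3
              have n4 : "last_heartbeat_at" ∉ cands := by simpa using h4
              have n5 : "ts" ∉ cands := by simpa using h5
              have hf : pvPreferredKeyOrder.find? (fun c => cands.contains c) = none := by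
                simp [pvPreferredKeyOrder, List.find?, n1, n2, n3, n4, n5]
              rw [hf]
              rcases hs : PySem.List.sorted cands (fun x => x) false with _ | ⟨m, t⟩
              · exact absurd ((PySem.List.sorted_eq_nil_iff _ _ _).mp hs) hemp
              · have hm : m ∈ cands := (PySem.List.mem_sorted _ _ _ _).mp (by rw [hs]; exact List.mem_cons_self)
                have hpw := PySem.List.sorted_ofList_pairwise_lt (keys.filter (fun k => PySem.Str.strip k != ""))
                rw [← hc, hs] at hpw
                have hlt' : ∀ y ∈ t, m < y := (List.pairwise_cons.mp hpw).1
                have hrz : ∀ z, z ∈ cands → pvRnk z = 5 := by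
                  intro z hz
                  have nz1 : z ≠ "last_tick_at" := fun he => n1 (he ▸ hz)
                  have nz2 : z ≠ "updated_at" := fun he => n2 (he ▸ hz)
                  have nz3 : z ≠ "last_status_at" := fun he => n3 (he ▸ hz)
                  have nz4 : z ≠ "last_heartbeat_at" := fun he => n4 (he ▸ hz)
                  have nz5 : z ≠ "ts" := fun he => n5 (he ▸ hz)
                  unfold pvRnk
                  rw [if_neg nz1, if_neg nz2, if_neg nz3, if_neg nz4, if_neg nz5]
                have hg : PySem.List.pyGet? (m :: t) (0:Int) = some m := by simp [PySem.List.pyGet?, PySem.List.pyIdx?]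
                simp only [hg]
                refine (pv_min2_eq pvRnk cands m hm ?_).symm
                intro y hy hne
                right
                have hy' : y ∈ t := by
                  have hmem2 := (PySem.List.mem_sorted cands (fun x => x) false y).mpr hy
                  rw [hs] at hmem2
                  rcases List.mem_cons.mp hmem2 with rfl | h
                  · exact absurd rfl hne
                  · exact h
                exact ⟨by rw [hrz m hm, hrz y hy], hlt' y hy'⟩
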